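-- pv_equiv track=rewrite | github.com/montaggroup/montag | web2py/applications/montag/models/pydb.py | trim_joblist
-- ===== SOURCE A (Python) =====
-- def trim_joblist(joblist, target_size):
--     result = []
--     j = list(joblist)
--     j.reverse()
--     for job in j:
--         if len(result) < target_size or job['is_running']:
--             result.append(job)
--     result.reverse()
--     return result
-- ===== SOURCE B (Python) =====
-- def trim_joblist(joblist, target_size):
--     cutoff = max(len(joblist) - target_size, 0)
--     return [job for job in joblist[:cutoff] if job['is_running']] + joblist[cutoff:]
-- ===== Notes on version B (the rewrite author's own statement) =====
-- stated objective: simpler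
-- what changed: Replaces the reverse/accumulate/reverse pass with a precomputed index cutoff: keep the last target_size jobs unconditionally plus the running jobs before that, as one slice-based expression.
import Mathlib
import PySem

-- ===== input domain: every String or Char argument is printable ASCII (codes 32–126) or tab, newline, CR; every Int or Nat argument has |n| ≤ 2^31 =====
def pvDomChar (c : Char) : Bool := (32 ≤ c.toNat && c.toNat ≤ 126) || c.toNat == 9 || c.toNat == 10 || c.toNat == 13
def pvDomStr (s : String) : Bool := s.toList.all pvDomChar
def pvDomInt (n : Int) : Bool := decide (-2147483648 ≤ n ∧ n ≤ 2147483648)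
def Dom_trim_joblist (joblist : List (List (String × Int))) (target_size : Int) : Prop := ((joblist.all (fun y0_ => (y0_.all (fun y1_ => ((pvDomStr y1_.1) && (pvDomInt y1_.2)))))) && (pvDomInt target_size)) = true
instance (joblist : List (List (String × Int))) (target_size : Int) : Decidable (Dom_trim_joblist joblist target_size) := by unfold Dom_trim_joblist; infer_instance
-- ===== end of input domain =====

-- B replaces A's reverse / length-conditioned accumulate / reverse pass by a precomputed
-- index cutoff: running jobs before the cutoff plus the whole tail, in one forward expression.

-- ===== PORT A =====
-- dict[k] on the association list: first match (= Python dict lookup under the type convention)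
def pvGet? (d : List (String × Int)) (k : String) : Option Int :=
  (d.find? (fun p => p.1 == k)).map Prod.snd
def pvGetD (d : List (String × Int)) (k : String) (dflt : Int) : Int :=
  (pvGet? d k).getD dflt
-- step of A's for-loop: append job if the result is still short or the job is running
-- (job['is_running'] is truthy iff its Int value ≠ 0; under Pre_ the key lookup never raises,
-- so getD with default 0 is exact there)
def trim_joblist (joblist : List (List (String × Int))) (target_size : Int) : List (List (String × Int)) :=
  let j := joblist.reverse
  let result := j.foldl
    (fun result job =>
      if (result.length : Int) < target_size || (pvGetD job "is_running" 0 != 0)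
      then result ++ [job] else result) []
  result.reverse

-- ===== PORT B =====
-- joblist[:cutoff] / joblist[cutoff:] with cutoff = max(len-target,0) ≥ 0 are exactly take/drop
def trim_joblist_alt (joblist : List (List (String × Int))) (target_size : Int) : List (List (String × Int)) :=
  let cutoff : Int := max ((joblist.length : Int) - target_size) 0
  (joblist.take cutoff.toNat).filter (fun job => pvGetD job "is_running" 0 != 0)
    ++ joblist.drop cutoff.toNat

-- ===== PRECONDITION & SPEC =====
-- Pre_ excludes exactly the inputs where Python A raises KeyError: a job before the cutoff
-- (the only jobs whose 'is_running' is ever looked up) lacking the key "is_running".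
def Pre_trim_joblist (joblist : List (List (String × Int))) (target_size : Int) : Prop :=
  ∀ job ∈ joblist.take (((joblist.length : Int) - target_size).toNat),
    (pvGet? job "is_running").isSome
instance (joblist : List (List (String × Int))) (target_size : Int) : Decidable (Pre_trim_joblist joblist target_size) := by unfold Pre_trim_joblist; infer_instance
def pvWitness_trim_joblist : (List (List (String × Int))) × Int :=
  ([[("is_running", 1)], [("is_running", 0)], [("x", 3)]], 2)

def Spec_trim_joblist (joblist : List (List (String × Int))) (target_size : Int) (out : List (List (String × Int))) : Prop := out = trim_joblist_alt joblist target_size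
instance (joblist : List (List (String × Int))) (target_size : Int) (out : List (List (String × Int))) : Decidable (Spec_trim_joblist joblist target_size out) := by unfold Spec_trim_joblist; infer_instance

-- ===== CLAIM (what is proved, stated in full; the proofs are below) =====
def Claim_equal_trim_joblist : Prop := ∀ (joblist : List (List (String × Int))) (target_size : Int), Dom_trim_joblist joblist target_size → Pre_trim_joblist joblist target_size → Spec_trim_joblist joblist target_size (trim_joblist joblist target_size)

-- ===== LEMMAS AND PROOFS =====

-- the "keep" test shared by both programs
def pvRun (job : List (String × Int)) : Bool := pvGetD job "is_running" 0 != 0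

-- B's result, written with the clamped cutoff folded into toNat
def pvKeep (l : List (List (String × Int))) (t : Int) : List (List (String × Int)) :=
  (l.take (((l.length : Int) - t).toNat)).filter pvRun ++ l.drop (((l.length : Int) - t).toNat)

lemma pvKeep_len_ge (l : List (List (String × Int))) (t : Int) (h : t ≤ (l.length : Int)) :
    t ≤ ((pvKeep l t).length : Int) := by
  rcases (by omega : t ≤ 0 ∨ 0 < t) with h0 | h0
  · have : (0:Int) ≤ ((pvKeep l t).length : Int) := by positivity
    omega
  · have hc : (((l.length : Int) - t).toNat) ≤ l.length := by omega
    have hd : (l.drop (((l.length : Int) - t).toNat)).length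
        = l.length - (((l.length : Int) - t).toNat) := List.length_drop
    have : (pvKeep l t).length
        = ((l.take (((l.length : Int) - t).toNat)).filter pvRun).length
          + (l.drop (((l.length : Int) - t).toNat)).length := by
      simp [pvKeep]
    omega

lemma pvKeep_all (l : List (List (String × Int))) (t : Int) (h : (l.length : Int) ≤ t) :
    pvKeep l t = l := by
  have : (((l.length : Int) - t).toNat) = 0 := by omega
  simp [pvKeep, this]

lemma pvKeep_cons (x : List (String × Int)) (l : List (List (String × Int))) (t : Int)
    (h : t ≤ (l.length : Int)) :
    pvKeep (x :: l) t = (if pvRun x then x :: pvKeep l t else pvKeep l t) := by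
  have hc : (((x :: l).length : Int) - t).toNat = (((l.length : Int) - t).toNat) + 1 := by
    simp only [List.length_cons]; omega
  simp only [pvKeep, hc, List.take_succ_cons, List.drop_succ_cons, List.filter_cons]
  split_ifs <;> simp

-- A's pre-final-reverse accumulator, computed by foldr over the original list,
-- equals B's result reversed
lemma foldr_eq_keep (t : Int) : ∀ (l : List (List (String × Int))),
    l.foldr (fun job result =>
      if (result.length : Int) < t || (pvGetD job "is_running" 0 != 0)
      then result ++ [job] else result) []
    = (pvKeep l t).reverse := by
  intro l
  induction l with
  | nil => simp [pvKeep]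
  | cons x xs ih =>
    simp only [List.foldr_cons, ih]
    rcases (by omega : t ≤ (xs.length : Int) ∨ (xs.length : Int) < t) with h | h
    · have hlen : ¬ (((pvKeep xs t).length : Int) < t) := by
        have := pvKeep_len_ge xs t h
        omega
      rw [pvKeep_cons x xs t h]
      by_cases hr : pvRun x
      · have hr' : (pvGetD x "is_running" 0 != 0) = true := hr
        simp [hlen, hr, hr']
      · have hr' : (pvGetD x "is_running" 0 != 0) = false := by
          simpa [pvRun] using hr
        simp [hlen, hr, hr']
    · have hall : pvKeep xs t = xs := pvKeep_all xs t (le_of_lt h)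
      have hxlen : (((x :: xs).length : Int) ≤ t) := by
        simp only [List.length_cons]
        push_cast
        omega
      have hcons : pvKeep (x :: xs) t = x :: xs := pvKeep_all (x :: xs) t hxlen
      simp [hall, hcons, h]

lemma alt_eq_keep (l : List (List (String × Int))) (t : Int) :
    trim_joblist_alt l t = pvKeep l t := by
  have : (max ((l.length : Int) - t) 0).toNat = (((l.length : Int) - t)).toNat := by omega
  simp only [trim_joblist_alt, pvKeep, this]
  rfl

-- ===== VERDICT (by name: the statement is the Claim_ definition above) =====
theorem trim_joblist_spec : Claim_equal_trim_joblist := by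
  intro joblist target_size _ _
  unfold Spec_trim_joblist trim_joblist
  rw [alt_eq_keep]
  simp only [List.foldl_reverse]
  rw [foldr_eq_keep target_size joblist, List.reverse_reverse]
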